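-- pv_equiv track=rewrite | github.com/Beliavsky/Pure-Fortran | xparam.py | strip_quoted_text
-- ===== SOURCE A (Python) =====
-- from typing import Dict, Iterable, List, Optional, Set, Tuple
--
-- def strip_quoted_text(text: str) -> str:
--     """Replace quoted string content with spaces for token scanning."""
--     out: List[str] = []
--     in_single = False
--     in_double = False
--     for ch in text:
--         if ch == "'" and not in_double:
--             in_single = not in_single
--             out.append(" ")
--         elif ch == '"' and not in_single:
--             in_double = not in_double
--             out.append(" ")
--         elif in_single or in_double:
--             out.append(" ")
--         else:
--             out.append(ch)
--     return "".join(out)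
-- ===== SOURCE B (Python) =====
-- def strip_quoted_text(text: str) -> str:
--     """Replace quoted string content with spaces for token scanning."""
--     out = []
--     i = 0
--     n = len(text)
--     while i < n:
--         ch = text[i]
--         if ch == "'" or ch == '"':
--             out.append(" ")
--             j = text.find(ch, i + 1)
--             if j == -1:
--                 out.append(" " * (n - i - 1))
--                 i = n
--             else:
--                 out.append(" " * (j - i))
--                 i = j + 1
--         else:
--             out.append(ch)
--             i += 1
--     return "".join(out)
-- ===== Notes on version B (the rewrite author's own statement) =====
-- stated objective: alternative
-- what changed: Replaced the per-character two-boolean (in_single/in_double) state machine with an index-driven scan that, on seeing a quote, uses str.find to jump to the matching quote and emits the whole blanked span at once.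
import Mathlib
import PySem

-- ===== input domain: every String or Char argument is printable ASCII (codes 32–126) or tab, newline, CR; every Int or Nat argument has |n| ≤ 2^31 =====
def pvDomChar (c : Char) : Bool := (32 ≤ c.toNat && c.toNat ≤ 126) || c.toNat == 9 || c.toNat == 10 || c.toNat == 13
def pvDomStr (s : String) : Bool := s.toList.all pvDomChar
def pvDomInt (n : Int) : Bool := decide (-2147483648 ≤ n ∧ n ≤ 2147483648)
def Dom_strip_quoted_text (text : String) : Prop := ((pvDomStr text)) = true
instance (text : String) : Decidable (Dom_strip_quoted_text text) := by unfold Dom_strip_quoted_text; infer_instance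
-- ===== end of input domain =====

-- B replaces A's per-character two-boolean state machine by an index scan that jumps
-- over each quoted span with find and blanks it in one go (objective: alternative).

-- ===== PORT A =====
-- per-character loop, state (out, in_single, in_double)
def pvStepA (st : List Char × Bool × Bool) (ch : Char) : List Char × Bool × Bool :=
  let (out, in_s, in_d) := st
  if ch = '\'' ∧ in_d = false then (out ++ [' '], !in_s, in_d)
  else if ch = '"' ∧ in_s = false then (out ++ [' '], in_s, !in_d)
  else if in_s = true ∨ in_d = true then (out ++ [' '], in_s, in_d)
  else (out ++ [ch], in_s, in_d)

def strip_quoted_text (text : String) : String :=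
  (text.toList.foldl pvStepA ([], false, false)).1.asString

-- ===== PORT B =====
-- index scan: on a quote, find the matching quote in the rest and blank the whole span
-- (List.idxOf? plays str.find; the two Python branches j == -1 / j ≥ 0 are the two match arms)
def pvGoB : List Char → List Char
  | [] => []
  | c :: rest =>
    if c = '\'' ∨ c = '"' then
      match h : rest.idxOf? c with
      | none => ' ' :: rest.map (fun _ => ' ')
      | some j => ' ' :: (List.replicate (j + 1) ' ' ++ pvGoB (rest.drop (j + 1)))
    else c :: pvGoB rest
termination_by l => l.length
decreasing_by
  · simpa using Nat.lt_succ_of_le (Nat.sub_le _ _)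
  · simp

def strip_quoted_text_alt (text : String) : String :=
  (pvGoB text.toList).asString

-- ===== PRECONDITION & SPEC =====
def Spec_strip_quoted_text (text : String) (out : String) : Prop := out = strip_quoted_text_alt text
instance (text : String) (out : String) : Decidable (Spec_strip_quoted_text text out) := by unfold Spec_strip_quoted_text; infer_instance

-- ===== CLAIM (what is proved, stated in full; the proofs are below) =====
def Claim_equal_strip_quoted_text : Prop := ∀ (text : String), Dom_strip_quoted_text text → Spec_strip_quoted_text text (strip_quoted_text text)

-- ===== LEMMAS AND PROOFS =====

-- proof-only intermediate: A's machine with the state compressed to "which quote is open"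
def pvGoM : Option Char → List Char → List Char
  | none, [] => []
  | none, c :: rest =>
    if c = '\'' ∨ c = '"' then ' ' :: pvGoM (some c) rest else c :: pvGoM none rest
  | some _, [] => []
  | some q, c :: rest =>
    if c = q then ' ' :: pvGoM none rest else ' ' :: pvGoM (some q) rest

lemma foldA_eq_goM (l : List Char) : ∀ out,
    (l.foldl pvStepA (out, false, false)).1 = out ++ pvGoM none l
    ∧ (l.foldl pvStepA (out, true, false)).1 = out ++ pvGoM (some '\'') l
    ∧ (l.foldl pvStepA (out, false, true)).1 = out ++ pvGoM (some '"') l := by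
  induction l with
  | nil => intro out; simp [pvGoM]
  | cons c rest ih =>
    intro out
    by_cases hs : c = '\''
    · subst hs
      simp [List.foldl, pvStepA, pvGoM, (ih (out ++ [' '])).1, (ih (out ++ [' '])).2.1,
        (ih (out ++ [' '])).2.2]
    · by_cases hd : c = '"'
      · subst hd
        simp [List.foldl, pvStepA, pvGoM, hs, (ih (out ++ [' '])).1,
          (ih (out ++ [' '])).2.1, (ih (out ++ [' '])).2.2]
      · simp [List.foldl, pvStepA, pvGoM, hs, hd, (ih (out ++ [c])).1,
          (ih (out ++ [' '])).2.1, (ih (out ++ [' '])).2.2, Ne.symm hs, Ne.symm hd]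

-- goM in a quote = blank the span up to the matching quote (the shape pvGoB emits)
lemma goM_some (q : Char) (l : List Char) :
    pvGoM (some q) l =
      match l.idxOf? q with
      | none => l.map (fun _ => ' ')
      | some j => List.replicate (j + 1) ' ' ++ pvGoM none (l.drop (j + 1)) := by
  induction l with
  | nil => simp [pvGoM, List.idxOf?]
  | cons c rest ih =>
    by_cases h : c = q
    · subst h
      simp [pvGoM, List.idxOf?, List.findIdx?_cons]
    · cases hfi : List.findIdx? (fun x => x == q) rest with
      | none => simp [pvGoM, List.idxOf?, List.findIdx?_cons, h, hfi, ih]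
      | some j =>
        simp [pvGoM, List.idxOf?, List.findIdx?_cons, h, hfi, ih, List.replicate_succ]

lemma goB_eq_goM : ∀ n (l : List Char), l.length ≤ n → pvGoB l = pvGoM none l := by
  intro n
  induction n with
  | zero =>
    intro l hl
    have : l = [] := List.eq_nil_of_length_eq_zero (Nat.le_zero.mp hl)
    subst this; simp [pvGoB, pvGoM]
  | succ n ih =>
    intro l hl
    cases l with
    | nil => simp [pvGoB, pvGoM]
    | cons c rest =>
      by_cases h : c = '\'' ∨ c = '"'
      · rw [pvGoB, pvGoM]
        simp only [if_pos h]
        rw [goM_some]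
        cases hfi : rest.idxOf? c with
        | none => simp [pvGoB, if_pos h, hfi]
        | some j =>
          have hlen : (rest.drop (j + 1)).length ≤ n := by
            have := List.length_drop (l := rest) (i := j + 1)
            simp at hl
            omega
          simp [pvGoB, if_pos h, hfi, ih _ hlen]
      · rw [pvGoB, pvGoM]
        simp only [if_neg h]
        have : rest.length ≤ n := by simpa using Nat.le_of_succ_le_succ (by simpa using hl)
        rw [ih _ this]

-- ===== VERDICT (by name: the statement is the Claim_ definition above) =====
theorem strip_quoted_text_spec : Claim_equal_strip_quoted_text := by
  intro text _
  unfold Spec_strip_quoted_text strip_quoted_text strip_quoted_text_alt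
  rw [(foldA_eq_goM text.toList []).1, goB_eq_goM text.toList.length text.toList le_rfl]
  simp
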